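-- pv_equiv track=rewrite | github.com/varungaddalay-github/daily-engineering-workout | problems/general_practice/dec_2025/2025_12_05.py | wrong_suspicious_linked_accounts
-- ===== SOURCE A (Python) =====
-- from collections import defaultdict, deque
--
-- def wrong_suspicious_linked_accounts(links, k):
--     # create an adj list
--     adj_list = defaultdict(list)
--
--     for u, v in links:
--         adj_list[u].append(v)
--         adj_list[v].append(u)
--
--     # calculate the component size and check if > k
--     res = set()
--
--     for key, v in adj_list.items():
--         if len(v) >= k:
--             res.add(key)
--             for i in v:
--                 res.add(i)
--     return sorted(res)
-- ===== SOURCE B (Python) =====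
-- from collections import Counter
--
-- def wrong_suspicious_linked_accounts(links, k):
--     # staged declarative pipeline: flatten endpoints, count degrees once,
--     # select high-degree nodes, then collect both endpoints of any edge
--     # touching a high-degree node
--     deg = Counter(x for uv in links for x in uv)
--     high = {u for u, d in deg.items() if d >= k}
--     res = {x for u, v in links if u in high or v in high for x in (u, v)}
--     return sorted(res)
-- ===== Notes on version B (the rewrite author's own statement) =====
-- stated objective: alternative
-- what changed: B replaces A's adjacency-list dict and nested node/neighbor loops with a staged comprehension pipeline: a Counter of endpoint degrees built from the flattened edge list, a set comprehension selecting high-degree nodes from its items, and a set comprehension over the edges collecting both endpoints of any edge touching a high-degree node.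
import Mathlib
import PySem

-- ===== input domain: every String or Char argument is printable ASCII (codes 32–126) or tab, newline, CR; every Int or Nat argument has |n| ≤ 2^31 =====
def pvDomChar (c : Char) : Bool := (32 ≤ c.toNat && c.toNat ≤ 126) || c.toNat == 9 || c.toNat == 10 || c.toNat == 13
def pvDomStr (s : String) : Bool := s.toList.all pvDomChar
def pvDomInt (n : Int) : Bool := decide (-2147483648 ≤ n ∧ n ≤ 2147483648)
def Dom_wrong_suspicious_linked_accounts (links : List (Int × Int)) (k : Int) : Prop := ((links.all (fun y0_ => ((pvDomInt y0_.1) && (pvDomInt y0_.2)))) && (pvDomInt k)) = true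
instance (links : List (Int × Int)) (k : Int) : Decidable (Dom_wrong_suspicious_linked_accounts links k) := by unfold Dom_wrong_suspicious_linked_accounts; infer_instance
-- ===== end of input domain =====

-- B replaces A's adjacency-list dict and nested node/neighbor loops with a staged
-- comprehension pipeline (degree Counter from flattened endpoints, set comprehension of
-- high-degree nodes, set comprehension over edges); alternative decomposition, same cost.

-- ===== PORT A =====
def wrong_suspicious_linked_accounts (links : List (Int × Int)) (k : Int) : List Int :=
  -- adj_list = defaultdict(list); for u, v in links: adj_list[u].append(v); adj_list[v].append(u)
  let adj : PySem.Dict Int (List Int) :=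
    links.foldl (fun d p => (d.modify p.1 [] (· ++ [p.2])).modify p.2 [] (· ++ [p.1]))
      PySem.Dict.empty
  -- res = set(); for key, v in adj_list.items(): if len(v) >= k: res.add(key); for i in v: res.add(i)
  let res : PySem.Set Int :=
    adj.items.foldl (fun r kv =>
      if k ≤ (kv.2.length : Int) then
        kv.2.foldl (fun r i => PySem.Set.add r i) (PySem.Set.add r kv.1)
      else r) PySem.Set.empty
  PySem.List.sorted res (fun x => x) false

-- ===== PORT B =====
def wrong_suspicious_linked_accounts_alt (links : List (Int × Int)) (k : Int) : List Int :=
  -- deg = Counter(x for uv in links for x in uv)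
  let ends : List Int := links.flatMap (fun uv => [uv.1, uv.2])
  let deg : PySem.Dict Int Int :=
    ends.foldl (fun d x => d.modify x 0 (· + 1)) PySem.Dict.empty
  -- high = {u for u, d in deg.items() if d >= k}   (set comprehension = ofList of the filtered stream; exact)
  let high : PySem.Set Int :=
    PySem.Set.ofList (((deg.items.filter (fun ud => k ≤ ud.2)).map (·.1)))
  -- res = {x for u, v in links if u in high or v in high for x in (u, v)}
  let res : PySem.Set Int :=
    PySem.Set.ofList
      ((links.filter (fun p => decide (p.1 ∈ high) || decide (p.2 ∈ high))).flatMap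
        (fun p => [p.1, p.2]))
  PySem.List.sorted res (fun x => x) false

-- ===== PRECONDITION & SPEC =====
def Spec_wrong_suspicious_linked_accounts (links : List (Int × Int)) (k : Int) (out : List Int) : Prop := out = wrong_suspicious_linked_accounts_alt links k
instance (links : List (Int × Int)) (k : Int) (out : List Int) : Decidable (Spec_wrong_suspicious_linked_accounts links k out) := by unfold Spec_wrong_suspicious_linked_accounts; infer_instance

-- ===== CLAIM (what is proved, stated in full; the proofs are below) =====
def Claim_equal_wrong_suspicious_linked_accounts : Prop := ∀ (links : List (Int × Int)) (k : Int), Dom_wrong_suspicious_linked_accounts links k → Spec_wrong_suspicious_linked_accounts links k (wrong_suspicious_linked_accounts links k)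


-- ===== LEMMAS AND PROOFS =====

-- Both directed copies of every edge: (u,v) contributes (u,v) and (v,u).
def pvE (links : List (Int × Int)) : List (Int × Int) :=
  links.flatMap (fun p => [(p.1, p.2), (p.2, p.1)])

-- Number of incident edge-slots of node n (self-loops count 2, duplicates accumulate).
def pvDeg (links : List (Int × Int)) (n : Int) : Int :=
  (((pvE links).map (·.1)).count n : Int)

-- Shared characterisation of the result set of both programs.
def pvP (links : List (Int × Int)) (k : Int) (x : Int) : Prop :=
  ∃ q ∈ pvE links, k ≤ pvDeg links q.1 ∧ (x = q.1 ∨ x = q.2)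

lemma pvE_mem {links : List (Int × Int)} {q : Int × Int} :
    q ∈ pvE links ↔ ∃ p ∈ links, q = (p.1, p.2) ∨ q = (p.2, p.1) := by
  simp only [pvE, List.mem_flatMap, List.mem_cons, List.not_mem_nil, or_false]

lemma pv_ends_eq (links : List (Int × Int)) :
    links.flatMap (fun uv => [uv.1, uv.2]) = (pvE links).map (·.1) := by
  simp [pvE, List.map_flatMap]

-- The degree counter B builds looks up to pvDeg.
lemma pv_degdict (links : List (Int × Int)) (n : Int) :
    ((links.flatMap (fun uv => [uv.1, uv.2])).foldl (fun d x => d.modify x 0 (· + 1))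
      (PySem.Dict.empty : PySem.Dict Int Int)).getD n 0 = pvDeg links n := by
  rw [PySem.Dict.getD_foldl_modify_add_one, pvDeg, pv_ends_eq]
  simp [pysem]

lemma pv_deg_keys (links : List (Int × Int)) :
    ((links.flatMap (fun uv => [uv.1, uv.2])).foldl (fun d x => d.modify x 0 (· + 1))
      (PySem.Dict.empty : PySem.Dict Int Int)).keys
    = PySem.Set.ofList (links.flatMap (fun uv => [uv.1, uv.2])) := by
  rw [PySem.Dict.keys_foldl_modify_key (links.flatMap (fun uv => [uv.1, uv.2]))
    (fun x => x) 0 (fun _ _ => (· + 1))]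
  simp only [PySem.Dict.empty, PySem.Dict.keys_mk, List.map_id']
  rfl

lemma pv_deg_keys_nodup (links : List (Int × Int)) :
    ((links.flatMap (fun uv => [uv.1, uv.2])).foldl (fun d x => d.modify x 0 (· + 1))
      (PySem.Dict.empty : PySem.Dict Int Int)).keys.Nodup := by
  rw [pv_deg_keys]; exact PySem.Set.nodup_ofList _

-- Membership in B's 'high' set: exactly the endpoint-listed nodes of degree ≥ k.
lemma pv_high_mem (links : List (Int × Int)) (k : Int) (u : Int) :
    (u ∈ PySem.Set.ofList
        (((((links.flatMap (fun uv => [uv.1, uv.2])).foldl (fun d x => d.modify x 0 (· + 1))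
          (PySem.Dict.empty : PySem.Dict Int Int)).items.filter
            (fun ud => k ≤ ud.2)).map (·.1))))
    ↔ u ∈ links.flatMap (fun uv => [uv.1, uv.2]) ∧ k ≤ pvDeg links u := by
  rw [PySem.Set.mem_ofList,
    PySem.Dict.items_eq_map_keys _ (pv_deg_keys_nodup links) 0]
  simp only [List.mem_map, List.mem_filter, decide_eq_true_eq]
  constructor
  · rintro ⟨a, ⟨⟨c, hc, rfl⟩, hdeg⟩, rfl⟩
    rw [pv_deg_keys, PySem.Set.mem_ofList] at hc
    rw [pv_degdict] at hdeg
    exact ⟨hc, hdeg⟩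
  · rintro ⟨hu, hdeg⟩
    refine ⟨(u, ((links.flatMap (fun uv => [uv.1, uv.2])).foldl
        (fun d x => d.modify x 0 (· + 1)) PySem.Dict.empty).getD u 0), ⟨⟨u, ?_, rfl⟩, ?_⟩, rfl⟩
    · rw [pv_deg_keys, PySem.Set.mem_ofList]; exact hu
    · rw [pv_degdict]; exact hdeg

lemma pv_memB_iff (links : List (Int × Int)) (k : Int) (x : Int) :
    x ∈ wrong_suspicious_linked_accounts_alt links k ↔ pvP links k x := by
  simp only [wrong_suspicious_linked_accounts_alt]
  rw [PySem.List.mem_sorted, PySem.Set.mem_ofList]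
  simp only [List.mem_flatMap, List.mem_filter, List.mem_cons, List.not_mem_nil, or_false,
    Bool.or_eq_true, decide_eq_true_eq, pv_high_mem]
  constructor
  · rintro ⟨p, ⟨hp, ⟨_, hdeg⟩ | ⟨_, hdeg⟩⟩, hx⟩
    · exact ⟨(p.1, p.2), pvE_mem.2 ⟨p, hp, Or.inl rfl⟩, hdeg, hx⟩
    · refine ⟨(p.2, p.1), pvE_mem.2 ⟨p, hp, Or.inr rfl⟩, hdeg, ?_⟩
      tauto
  · rintro ⟨q, hq, hdeg, hx⟩
    rcases pvE_mem.1 hq with ⟨p, hp, rfl | rfl⟩ <;>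
      refine ⟨p, ⟨hp, ?_⟩, ?_⟩
    · exact Or.inl ⟨⟨p, hp, Or.inl rfl⟩, hdeg⟩
    · exact hx
    · exact Or.inr ⟨⟨p, hp, Or.inr rfl⟩, hdeg⟩
    · tauto

-- The adjacency dictionary A builds, looked up at c, lists the neighbors of c in order.
lemma pv_adj_getD (links : List (Int × Int)) (c : Int) :
    (links.foldl (fun d p => (d.modify p.1 [] (· ++ [p.2])).modify p.2 [] (· ++ [p.1]))
      (PySem.Dict.empty : PySem.Dict Int (List Int))).getD c []
    = ((pvE links).filter (fun q => q.1 == c)).map (·.2) := by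
  have h : links.foldl (fun d p => (d.modify p.1 [] (· ++ [p.2])).modify p.2 [] (· ++ [p.1]))
        (PySem.Dict.empty : PySem.Dict Int (List Int))
      = (pvE links).foldl (fun d q => d.modify q.1 [] (· ++ [q.2])) PySem.Dict.empty := by
    rw [pvE, List.foldl_flatMap]; rfl
  rw [h, PySem.Dict.getD_foldl_modify_append]
  simp [pysem]

lemma pv_adj_keys (links : List (Int × Int)) :
    (links.foldl (fun d p => (d.modify p.1 [] (· ++ [p.2])).modify p.2 [] (· ++ [p.1]))
      (PySem.Dict.empty : PySem.Dict Int (List Int))).keys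
    = PySem.Set.ofList ((pvE links).map (·.1)) := by
  have h : links.foldl (fun d p => (d.modify p.1 [] (· ++ [p.2])).modify p.2 [] (· ++ [p.1]))
        (PySem.Dict.empty : PySem.Dict Int (List Int))
      = (pvE links).foldl (fun d q => d.modify q.1 [] (· ++ [q.2])) PySem.Dict.empty := by
    rw [pvE, List.foldl_flatMap]; rfl
  rw [h, PySem.Dict.keys_foldl_modify_key (pvE links) (·.1) [] (fun _ q => (· ++ [q.2]))]
  simp only [PySem.Dict.empty, PySem.Dict.keys_mk]
  rfl

lemma pv_adj_keys_nodup (links : List (Int × Int)) :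
    (links.foldl (fun d p => (d.modify p.1 [] (· ++ [p.2])).modify p.2 [] (· ++ [p.1]))
      (PySem.Dict.empty : PySem.Dict Int (List Int))).keys.Nodup := by
  rw [pv_adj_keys]
  exact PySem.Set.nodup_ofList _

-- Membership and Nodup of A's accumulation loop.
lemma pv_memA (C : Int × List Int → Prop) [DecidablePred C] (l : List (Int × List Int))
    (s : PySem.Set Int) (y : Int) :
    (y ∈ l.foldl (fun r kv =>
        if C kv then kv.2.foldl (fun r i => PySem.Set.add r i) (PySem.Set.add r kv.1) else r) s)
    ↔ y ∈ s ∨ ∃ kv ∈ l, C kv ∧ (y = kv.1 ∨ y ∈ kv.2) := by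
  induction l generalizing s with
  | nil => simp
  | cons hd tl ih =>
    have hin : ∀ (t : PySem.Set Int),
        hd.2.foldl (fun r i => PySem.Set.add r i) t = t.update hd.2 := by
      intro t
      rw [← List.map_id' hd.2, PySem.Set.update_map_eq_foldl_add hd.2 (fun i => i) t,
        List.map_id']
    by_cases h : C hd <;>
      simp [h, ih, hin, PySem.Set.mem_update, PySem.Set.mem_add, or_assoc]

lemma pv_nodupA (C : Int × List Int → Prop) [DecidablePred C] (l : List (Int × List Int))
    (s : PySem.Set Int) (hs : s.Nodup) :
    (l.foldl (fun r kv =>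
        if C kv then kv.2.foldl (fun r i => PySem.Set.add r i) (PySem.Set.add r kv.1) else r) s).Nodup := by
  induction l generalizing s with
  | nil => exact hs
  | cons hd tl ih =>
    by_cases h : C hd <;> simp only [List.foldl_cons, h, ite_true, ite_false]
    · refine ih _ ?_
      rw [← List.map_id' hd.2, ← PySem.Set.update_map_eq_foldl_add]
      exact PySem.Set.nodup_update _ _ (PySem.Set.nodup_add _ _ hs)
    · exact ih _ hs

lemma pv_memA_iff (links : List (Int × Int)) (k : Int) (x : Int) :
    x ∈ wrong_suspicious_linked_accounts links k ↔ pvP links k x := by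
  simp only [wrong_suspicious_linked_accounts]
  rw [PySem.List.mem_sorted, pv_memA]
  rw [PySem.Dict.items_eq_map_keys _ (pv_adj_keys_nodup links) []]
  constructor
  · rintro (h | ⟨kv, hkv, hdeg, hx⟩)
    · simp [PySem.Set.empty] at h
    · obtain ⟨c, hc, rfl⟩ := List.mem_map.1 hkv
      rw [pv_adj_keys, PySem.Set.mem_ofList] at hc
      obtain ⟨q0, hq0, hq0c⟩ := List.mem_map.1 hc
      have hlen : ((((links.foldl (fun d p => (d.modify p.1 [] (· ++ [p.2])).modify p.2 []
            (· ++ [p.1])) PySem.Dict.empty).getD c []).length : Int)) = pvDeg links c := by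
        rw [pv_adj_getD, pvDeg, List.length_map, List.count_eq_countP, List.countP_map]
        simp only [← List.countP_eq_length_filter]
        congr 1
      rw [hlen] at hdeg
      rcases hx with rfl | hx
      · exact ⟨q0, hq0, hq0c ▸ hdeg, Or.inl hq0c.symm⟩
      · rw [pv_adj_getD] at hx
        obtain ⟨q, hqf, rfl⟩ := List.mem_map.1 hx
        obtain ⟨hqE, hq1⟩ := List.mem_filter.1 hqf
        have hq1' : q.1 = c := by simpa using hq1
        exact ⟨q, hqE, hq1' ▸ hdeg, Or.inr rfl⟩
  · rintro ⟨q, hq, hdeg, hx⟩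
    refine Or.inr ⟨(q.1, (links.foldl (fun d p => (d.modify p.1 [] (· ++ [p.2])).modify p.2 []
      (· ++ [p.1])) PySem.Dict.empty).getD q.1 []), ?_, ?_, ?_⟩
    · refine List.mem_map.2 ⟨q.1, ?_, rfl⟩
      rw [pv_adj_keys, PySem.Set.mem_ofList]
      exact List.mem_map.2 ⟨q, hq, rfl⟩
    · show k ≤ _
      have hlen : ((((links.foldl (fun d p => (d.modify p.1 [] (· ++ [p.2])).modify p.2 []
            (· ++ [p.1])) PySem.Dict.empty).getD q.1 []).length : Int)) = pvDeg links q.1 := by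
        rw [pv_adj_getD, pvDeg, List.length_map, List.count_eq_countP, List.countP_map]
        simp only [← List.countP_eq_length_filter]
        congr 1
      rw [hlen]; exact hdeg
    · rcases hx with rfl | rfl
      · exact Or.inl rfl
      · refine Or.inr ?_
        rw [pv_adj_getD]
        exact List.mem_map.2 ⟨q, List.mem_filter.2 ⟨hq, by simp⟩, rfl⟩

lemma pv_nodup_B_res (links : List (Int × Int)) (k : Int) :
    (wrong_suspicious_linked_accounts_alt links k).Nodup := by
  simp only [wrong_suspicious_linked_accounts_alt]
  refine (PySem.List.sorted_perm _ _ _).nodup_iff.2 ?_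
  exact PySem.Set.nodup_ofList _

lemma pv_nodup_A_res (links : List (Int × Int)) (k : Int) :
    (wrong_suspicious_linked_accounts links k).Nodup := by
  simp only [wrong_suspicious_linked_accounts]
  refine (PySem.List.sorted_perm _ _ _).nodup_iff.2 ?_
  exact pv_nodupA _ _ _ (by simp [PySem.Set.empty])

-- ===== VERDICT (by name: the statement is the Claim_ definition above) =====
theorem wrong_suspicious_linked_accounts_spec : Claim_equal_wrong_suspicious_linked_accounts := by
  intro links k _
  show wrong_suspicious_linked_accounts links k = wrong_suspicious_linked_accounts_alt links k
  have hperm : (wrong_suspicious_linked_accounts links k).Perm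
      (wrong_suspicious_linked_accounts_alt links k) :=
    (List.perm_ext_iff_of_nodup (pv_nodup_A_res links k) (pv_nodup_B_res links k)).2
      (fun a => (pv_memA_iff links k a).trans (pv_memB_iff links k a).symm)
  have hsortA : (wrong_suspicious_linked_accounts links k).Pairwise (· < ·) := by
    have hle : (wrong_suspicious_linked_accounts links k).Pairwise (· ≤ ·) := by
      simp only [wrong_suspicious_linked_accounts]
      exact PySem.List.sorted_pairwise _ _
    exact ((hle.and (pv_nodup_A_res links k)).imp (fun h => lt_of_le_of_ne h.1 h.2))
  have hsortB : (wrong_suspicious_linked_accounts_alt links k).Pairwise (· < ·) := by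
    have hle : (wrong_suspicious_linked_accounts_alt links k).Pairwise (· ≤ ·) := by
      simp only [wrong_suspicious_linked_accounts_alt]
      exact PySem.List.sorted_pairwise _ _
    exact ((hle.and (pv_nodup_B_res links k)).imp (fun h => lt_of_le_of_ne h.1 h.2))
  exact List.Perm.eq_of_pairwise (fun _ _ _ _ h h' => le_antisymm h.le h'.le) hsortA hsortB hperm
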